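-- pv_equiv track=rewrite | github.com/johnnnathan/Crack | crackme-1_by_para/keygen.py | find_input_for_result
-- ===== SOURCE A (Python) =====
-- from itertools import product
-- import string
--
-- def operate_upon(key):
--     length = 0
--     result = 0
--
--     while key[length] != '\0':
--         length += 1
--
--     length_2 = length
--
--     i = 0
--
--     while i <= length_2 - 1:
--         result = (ord(key[i]) + (result << 6)) % 0x989680
--         i += 1
--
--
--     return result
--
-- def find_input_for_result(target_result, max_length=5):
--
--     possible_chars = string.ascii_letters + string.digits + string.punctuation + ' '
--
--     for length in range(1, max_length + 1):
--         for combination in product(possible_chars, repeat=length):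
--             key = ''.join(combination) + '\0'
--             result = operate_upon(key)
--             if result == target_result:
--                 return ''.join(combination)
--
--     return None
-- ===== SOURCE B (Python) =====
-- import string
--
-- _M = 0x989680
--
-- def _pow64(n):
--     # 64**n mod _M
--     shift = 1
--     for _ in range(n):
--         shift = shift * 64 % _M
--     return shift
--
-- def _prodh(chars, n):
--     # all (string, hash) pairs of length n over chars, in itertools.product
--     # order (leftmost position varies slowest); hash built incrementally:
--     # h(c + s) = (ord(c) * 64**len(s) + h(s)) mod _M
--     if n == 0:
--         return [('', 0)]
--     rest = _prodh(chars, n - 1)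
--     p = _pow64(n - 1)
--     return [(c + s, (ord(c) * p + h) % _M) for c in chars for (s, h) in rest]
--
-- def _prodh_lazy(chars, n):
--     # same pairs as _prodh(chars, n), yielded lazily for the scanned side
--     if n == 0:
--         yield ('', 0)
--         return
--     rest = _prodh(chars, n - 1)
--     p = _pow64(n - 1)
--     for c in chars:
--         cp = ord(c) * p
--         for s, h in rest:
--             yield (c + s, (cp + h) % _M)
--
-- def find_input_for_result(target_result, max_length=5):
--     chars = string.ascii_letters + string.digits + string.punctuation + ' '
--     if not (0 <= target_result < _M):
--         return None  # the hash is always in [0, _M): no key can match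
--     for length in range(1, max_length + 1):
--         n2 = length // 2
--         n1 = length - n2
--         # residue of a suffix half -> first suffix (in product order) with it
--         d = {}
--         for s, h in _prodh(chars, n2):
--             d.setdefault(h, s)
--         shift = _pow64(n2)
--         for p, h in _prodh_lazy(chars, n1):
--             need = (target_result - h * shift) % _M
--             if need in d:
--                 return p + d[need]
--     return None
-- ===== Notes on version B (the rewrite author's own statement) =====
-- stated objective: alternative
-- what changed: replaces the exhaustive scan of all C^L candidate strings (each re-hashed from scratch with a strlen pass) by a per-length meet-in-the-middle search: a dict mapping each suffix-half residue to its first suffix, then a scan of prefix halves with incrementally computed hashes, looking up the needed suffix residue in O(1)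
import Mathlib
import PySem

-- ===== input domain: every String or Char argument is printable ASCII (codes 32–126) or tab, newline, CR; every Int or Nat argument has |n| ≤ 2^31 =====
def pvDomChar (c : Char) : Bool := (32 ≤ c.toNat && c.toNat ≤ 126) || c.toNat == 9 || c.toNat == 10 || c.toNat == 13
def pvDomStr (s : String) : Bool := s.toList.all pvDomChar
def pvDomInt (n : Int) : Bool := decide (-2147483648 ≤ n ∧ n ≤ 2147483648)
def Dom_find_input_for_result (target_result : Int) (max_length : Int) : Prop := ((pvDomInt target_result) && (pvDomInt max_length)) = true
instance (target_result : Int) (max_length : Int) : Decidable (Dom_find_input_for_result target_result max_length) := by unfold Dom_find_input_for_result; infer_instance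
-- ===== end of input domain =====

-- B replaces A's exhaustive per-candidate hashing by a per-length meet-in-the-middle search
-- (a dict mapping suffix-half residues to their first suffix, then a scan of prefix halves with
-- incrementally computed hashes); same return value, a different algorithm.

-- ===== PORT A =====

-- string.ascii_letters + string.digits + string.punctuation + ' '  (95 characters)
def pvChars : List Char :=
  "abcdefghijklmnopqrstuvwxyzABCDEFGHIJKLMNOPQRSTUVWXYZ0123456789!\"#$%&'()*+,-./:;<=>?@[\\]^_`{|}~ ".toList

-- itertools.product(possible_chars, repeat=n), in product order (leftmost position varies slowest)
def pvCombos (n : Nat) : List (List Char) :=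
  match n with
  | 0 => [[]]
  | k + 1 => pvChars.flatMap (fun c => (pvCombos k).map (fun s => c :: s))

-- while key[length] != '\0': length += 1   (A's keys always end with '\0', so no IndexError)
def pvStrlen : List Char → Nat
  | [] => 0
  | c :: rest => if c = '\x00' then 0 else pvStrlen rest + 1

def operate_upon (key : List Char) : Int :=
  let length := pvStrlen key
  -- while i <= length_2 - 1: result = (ord(key[i]) + (result << 6)) % 0x989680
  (PySem.List.pyRange 0 (length : Int) 1).foldl
    (fun result i =>
      PySem.Int.mod (((PySem.List.pyGetD key i '\x00').toNat : Int) + (result <<< (6 : Nat))) 10000000)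
    0

def find_input_for_result (target_result : Int) (max_length : Int) : Option String :=
  (PySem.List.pyRange 1 (max_length + 1) 1).findSome? (fun length =>
    (pvCombos length.toNat).findSome? (fun combination =>
      let key := combination ++ ['\x00']
      let result := operate_upon key
      if result = target_result then some (String.ofList combination) else none))

-- ===== PORT B =====

-- shift = 1; for _ in range(n): shift = shift * 64 % _M
def pvPow64 (n : Nat) : Int :=
  (List.range n).foldl (fun shift _ => PySem.Int.mod (shift * 64) 10000000) 1

-- _prodh: all (string, hash) pairs of length n, product order, hash built incrementally
def pvProdH (n : Nat) : List (List Char × Int) :=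
  match n with
  | 0 => [([], 0)]
  | k + 1 => pvChars.flatMap (fun c => (pvProdH k).map (fun sh =>
      (c :: sh.1, PySem.Int.mod ((c.toNat : Int) * pvPow64 k + sh.2) 10000000)))

-- _prodh_lazy: the generator twin of _prodh (yields the same pairs in the same order)
def pvProdHLazy (n : Nat) : List (List Char × Int) :=
  match n with
  | 0 => [([], 0)]
  | k + 1 => pvChars.flatMap (fun c => (pvProdH k).map (fun sh =>
      (c :: sh.1, PySem.Int.mod ((c.toNat : Int) * pvPow64 k + sh.2) 10000000)))

-- residue of a suffix half -> first suffix (in product order) with that residue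
def pvSuffixDict (n2 : Nat) : PySem.Dict Int (List Char) :=
  (pvProdH n2).foldl (fun d sh => d.setdefault sh.2 sh.1) PySem.Dict.empty

def find_input_for_result_alt (target_result : Int) (max_length : Int) : Option String :=
  if 0 ≤ target_result ∧ target_result < 10000000 then
    (PySem.List.pyRange 1 (max_length + 1) 1).findSome? (fun length =>
      let n2 := (PySem.Int.floordiv length 2).toNat
      let n1 := length.toNat - n2
      let d := pvSuffixDict n2
      let shift := pvPow64 n2
      (pvProdHLazy n1).findSome? (fun ph =>
        match d.get? (PySem.Int.mod (target_result - ph.2 * shift) 10000000) with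
        | some s => some (String.ofList (ph.1 ++ s))
        | none => none))
  else none  -- the hash is always in [0, _M): no key can match

-- ===== PRECONDITION & SPEC =====
def Spec_find_input_for_result (target_result : Int) (max_length : Int) (out : Option String) : Prop := out = find_input_for_result_alt target_result max_length
instance (target_result : Int) (max_length : Int) (out : Option String) : Decidable (Spec_find_input_for_result target_result max_length out) := by unfold Spec_find_input_for_result; infer_instance

-- ===== CLAIM (what is proved, stated in full; the proofs are below) =====
def Claim_equal_find_input_for_result : Prop := ∀ (target_result : Int) (max_length : Int), Dom_find_input_for_result target_result max_length → Spec_find_input_for_result target_result max_length (find_input_for_result target_result max_length)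

-- ===== LEMMAS AND PROOFS =====

set_option maxRecDepth 2048 in
lemma pvChars_all : pvChars.all (fun c => decide (c.toNat < 10000000) && c != '\x00') = true := by decide

lemma pvChars_prop : ∀ c ∈ pvChars, (c.toNat : Int) < 10000000 ∧ c ≠ '\x00' := by
  intro c hc
  have h := List.all_eq_true.mp pvChars_all c hc
  simp only [Bool.and_eq_true, decide_eq_true_eq, bne_iff_ne] at h
  exact ⟨by exact_mod_cast h.1, h.2⟩

lemma pvCombos_length {n : Nat} : ∀ s ∈ pvCombos n, s.length = n := by
  induction n with
  | zero => simp [pvCombos]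
  | succ k ih =>
    intro s hs
    simp only [pvCombos, List.mem_flatMap, List.mem_map] at hs
    obtain ⟨c, _, s', hs', rfl⟩ := hs
    simp [ih s' hs']

lemma pvCombos_chars {n : Nat} : ∀ s ∈ pvCombos n, ∀ c ∈ s, c ∈ pvChars := by
  induction n with
  | zero => simp [pvCombos]
  | succ k ih =>
    intro s hs
    simp only [pvCombos, List.mem_flatMap, List.mem_map] at hs
    obtain ⟨c, hc, s', hs', rfl⟩ := hs
    intro x hx
    rcases List.mem_cons.mp hx with rfl | hx
    · exact hc
    · exact ih s' hs' x hx

lemma pvCombos_split (n1 n2 : Nat) :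
    pvCombos (n1 + n2) = (pvCombos n1).flatMap (fun p => (pvCombos n2).map (fun s => p ++ s)) := by
  induction n1 with
  | zero => simp [pvCombos, List.map_id']
  | succ k ih =>
    rw [show k + 1 + n2 = (k + n2) + 1 by omega]
    simp only [pvCombos, ih, List.flatMap_assoc, List.flatMap_map, List.map_flatMap,
      List.map_map, Function.comp_def, List.cons_append]

-- proof-side: the hash of a string as one fold (A computes it via strlen + index loop,
-- B incrementally along pvProdH; both are related to this form)
def pvHash (s : List Char) : Int :=
  s.foldl (fun acc c => PySem.Int.mod ((c.toNat : Int) + acc * 64) 10000000) 0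

-- proof-side form of the hash fold with a general accumulator
def pvHF (a : Int) (s : List Char) : Int :=
  s.foldl (fun acc c => ((c.toNat : Int) + acc * 64) % 10000000) a

lemma pvHash_eq_HF (s : List Char) : pvHash s = pvHF 0 s := by
  simp [pvHash, pvHF]

lemma pvHF_bounds : ∀ (s : List Char) (a : Int), 0 ≤ a → a < 10000000 →
    0 ≤ pvHF a s ∧ pvHF a s < 10000000 := by
  intro s
  induction s with
  | nil => intro a h0 h1; exact ⟨h0, h1⟩
  | cons c s ih =>
    intro a h0 h1
    have : pvHF a (c :: s) = pvHF (((c.toNat : Int) + a * 64) % 10000000) s := rfl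
    rw [this]
    exact ih _ (Int.emod_nonneg _ (by norm_num)) (Int.emod_lt_of_pos _ (by norm_num))

lemma pvHF_compose : ∀ (s : List Char) (a : Int), 0 ≤ a → a < 10000000 →
    (∀ c ∈ s, (c.toNat : Int) < 10000000) →
    pvHF a s = (a * 64 ^ s.length + pvHF 0 s) % 10000000 := by
  intro s
  induction s with
  | nil =>
    intro a h0 h1 _
    simp only [pvHF, List.foldl_nil, List.length_nil, pow_zero, mul_one, add_zero]
    exact (Int.emod_eq_of_lt h0 h1).symm
  | cons c s ih =>
    intro a h0 h1 hmem
    have hcb : (0:Int) ≤ (c.toNat : Int) := by positivity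
    have hclt : (c.toNat : Int) < 10000000 := hmem c (List.mem_cons_self ..)
    have hmem' : ∀ x ∈ s, (x.toNat : Int) < 10000000 :=
      fun x hx => hmem x (List.mem_cons_of_mem _ hx)
    have ha' : pvHF a (c :: s) = pvHF (((c.toNat : Int) + a * 64) % 10000000) s := rfl
    have h0' : pvHF 0 (c :: s) = pvHF (((c.toNat : Int) + 0 * 64) % 10000000) s := rfl
    have hc0 : ((c.toNat : Int) + 0 * 64) % 10000000 = (c.toNat : Int) := by
      rw [zero_mul, add_zero]; exact Int.emod_eq_of_lt hcb hclt
    rw [ha', h0', hc0,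
      ih _ (Int.emod_nonneg _ (by norm_num)) (Int.emod_lt_of_pos _ (by norm_num)) hmem',
      ih _ hcb hclt hmem']
    have e1 : ((((c.toNat : Int) + a * 64) % 10000000) * 64 ^ s.length + pvHF 0 s) % 10000000
        = (((c.toNat : Int) + a * 64) * 64 ^ s.length + pvHF 0 s) % 10000000 := by
      conv_lhs => rw [Int.add_emod, Int.mul_emod, Int.emod_emod_of_dvd _ dvd_rfl,
        ← Int.mul_emod, ← Int.add_emod]
    have e2 : (a * 64 ^ (c :: s).length + ((c.toNat : Int) * 64 ^ s.length + pvHF 0 s) % 10000000) % 10000000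
        = (a * 64 ^ (c :: s).length + ((c.toNat : Int) * 64 ^ s.length + pvHF 0 s)) % 10000000 := by
      conv_lhs => rw [Int.add_emod, Int.emod_emod_of_dvd _ dvd_rfl, ← Int.add_emod]
    rw [e1, e2, List.length_cons, pow_succ]
    ring_nf

lemma pvPow64_spec (n : Nat) : pvPow64 n = (64 : Int) ^ n % 10000000 := by
  induction n with
  | zero => rfl
  | succ k ih =>
    rw [pvPow64, List.range_succ, List.foldl_append]
    rw [pvPow64] at ih
    rw [ih]
    simp only [List.foldl_cons, List.foldl_nil,
      PySem.Int.mod_eq_emod_of_pos (show (0:Int) < 10000000 by norm_num)]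
    rw [pow_succ, Int.mul_emod, Int.emod_emod_of_dvd _ dvd_rfl, ← Int.mul_emod]

lemma pvProdHLazy_eq (n : Nat) : pvProdHLazy n = pvProdH n := by
  cases n <;> rfl

lemma pvHF_cons (c : Char) (s : List Char) (hc : c ∈ pvChars) (hs : ∀ x ∈ s, x ∈ pvChars) :
    PySem.Int.mod ((c.toNat : Int) * pvPow64 s.length + pvHF 0 s) 10000000 = pvHF 0 (c :: s) := by
  have hcb : (0:Int) ≤ (c.toNat : Int) := by positivity
  have hclt : (c.toNat : Int) < 10000000 := (pvChars_prop c hc).1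
  have hsb : ∀ x ∈ s, (x.toNat : Int) < 10000000 := fun x hx => (pvChars_prop x (hs x hx)).1
  have h0 : pvHF 0 (c :: s) = pvHF (((c.toNat : Int) + 0 * 64) % 10000000) s := rfl
  have hc0 : ((c.toNat : Int) + 0 * 64) % 10000000 = (c.toNat : Int) := by
    rw [zero_mul, add_zero]; exact Int.emod_eq_of_lt hcb hclt
  rw [PySem.Int.mod_eq_emod_of_pos (show (0:Int) < 10000000 by norm_num), pvPow64_spec,
    h0, hc0, pvHF_compose s (c.toNat : Int) hcb hclt hsb]
  conv_lhs => rw [Int.add_emod, Int.mul_emod, Int.emod_emod_of_dvd _ dvd_rfl,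
    ← Int.mul_emod, ← Int.add_emod]

lemma pvProdH_eq (n : Nat) : pvProdH n = (pvCombos n).map (fun s => (s, pvHF 0 s)) := by
  induction n with
  | zero => rfl
  | succ k ih =>
    simp only [pvProdH, pvCombos, ih, List.map_flatMap, List.map_map]
    apply List.flatMap_congr
    intro c hc
    apply List.map_congr_left
    intro s hsmem
    simp only [Function.comp_apply]
    have := pvHF_cons c s hc (pvCombos_chars s hsmem)
    rw [pvCombos_length s hsmem] at this
    rw [this]

lemma pvStrlen_append (s : List Char) (h : ∀ c ∈ s, c ≠ '\x00') :
    pvStrlen (s ++ ['\x00']) = s.length := by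
  induction s with
  | nil => simp [pvStrlen]
  | cons c s ih =>
    have hc := h c (List.mem_cons_self ..)
    simp only [List.cons_append, pvStrlen, if_neg hc]
    rw [ih (fun x hx => h x (List.mem_cons_of_mem _ hx))]
    simp

lemma pvFoldl_range_getD : ∀ (s t : List Char) (f : Int → Char → Int) (a : Int),
    (List.range s.length).foldl (fun r k => f r ((s ++ t).getD k '\x00')) a = s.foldl f a := by
  intro s
  induction s using List.reverseRecOn with
  | nil => intro t f a; rfl
  | append_singleton s x ih =>
    intro t f a
    rw [List.length_append, List.length_singleton, List.range_succ, List.foldl_append,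
      List.foldl_append]
    simp only [List.append_assoc, List.singleton_append]
    rw [ih (x :: t) f a]
    simp only [List.foldl_cons, List.foldl_nil]
    congr 1
    rw [List.getD, List.getElem?_append_right (le_refl s.length)]
    simp

lemma operate_upon_eq_hash (s : List Char) (hs : ∀ c ∈ s, c ∈ pvChars) :
    operate_upon (s ++ ['\x00']) = pvHash s := by
  have hnul : ∀ c ∈ s, c ≠ '\x00' := fun c hc => (pvChars_prop c (hs c hc)).2
  rw [operate_upon]
  simp only [pvStrlen_append s hnul, PySem.List.pyRange_zero_nat, List.foldl_map,
    PySem.List.pyGetD_natCast, Int.shiftLeft_eq,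
    PySem.Int.mod_eq_emod_of_pos (show (0:Int) < 10000000 by norm_num)]
  rw [pvHash_eq_HF, pvHF]
  have := pvFoldl_range_getD s ['\x00']
    (fun r c => ((c.toNat : Int) + r * 64) % 10000000) 0
  simp only at this ⊢
  convert this using 3

lemma pvFindSome?_congr {α β : Type _} (l : List α) (f g : α → Option β)
    (h : ∀ x ∈ l, f x = g x) : l.findSome? f = l.findSome? g := by
  induction l with
  | nil => rfl
  | cons x l ih =>
    rw [List.findSome?_cons, List.findSome?_cons, h x (List.mem_cons_self ..)]
    cases g x with
    | some v => rfl
    | none => exact ih (fun y hy => h y (List.mem_cons_of_mem _ hy))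

lemma pvFindSome?_flatMap {α β γ : Type _} (l : List α) (f : α → List β) (g : β → Option γ) :
    (l.flatMap f).findSome? g = l.findSome? (fun x => (f x).findSome? g) := by
  induction l with
  | nil => rfl
  | cons x l ih =>
    rw [List.flatMap_cons, List.findSome?_append, ih, List.findSome?_cons]
    cases h : (f x).findSome? g <;> simp_all
    

lemma pvFindSome?_ite {α β : Type _} (l : List α) (p : α → Bool) (g : α → β) :
    l.findSome? (fun x => if p x then some (g x) else none) = (l.find? p).map g := by
  induction l with
  | nil => rfl
  | cons x l ih =>
    rw [List.findSome?_cons, List.find?_cons]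
    by_cases h : p x <;> simp [h, ih]

lemma pvSuffixDict_get? : ∀ (l : List (List Char)) (d : PySem.Dict Int (List Char)) (r : Int),
    (l.foldl (fun d s => d.setdefault (pvHash s) s) d).get? r
      = (d.get? r).or (l.find? (fun s => pvHash s == r)) := by
  intro l
  induction l with
  | nil => intro d r; simp
  | cons s l ih =>
    intro d r
    rw [List.foldl_cons, List.find?_cons]
    cases hc : d.contains (pvHash s) with
    | true =>
      rw [PySem.Dict.setdefault_of_contains d s hc, ih]
      by_cases hr : pvHash s = r
      · subst hr
        have hne : d.get? (pvHash s) ≠ none := fun heq => by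
          have := (PySem.Dict.get?_eq_none_iff_contains d (pvHash s)).mp heq
          simp [this] at hc
        obtain ⟨v, hv⟩ := Option.ne_none_iff_exists'.mp hne
        simp [hv]
      · have hbe : (pvHash s == r) = false := by simp [hr]
        rw [hbe]
    | false =>
      rw [PySem.Dict.setdefault_of_not_contains d s hc, ih]
      have hdnone : d.get? (pvHash s) = none :=
        (PySem.Dict.get?_eq_none_iff_contains d (pvHash s)).mpr hc
      by_cases hr : r = pvHash s
      · subst hr
        rw [PySem.Dict.get?_insert_self, hdnone]
        simp
      · rw [PySem.Dict.get?_insert_of_ne d s hr]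
        have : (pvHash s == r) = false := by simp [Ne.symm hr]
        simp [this]

lemma pvSuffixDict_spec (n2 : Nat) (r : Int) :
    (pvSuffixDict n2).get? r = (pvCombos n2).find? (fun s => pvHash s == r) := by
  rw [pvSuffixDict, pvProdH_eq, List.foldl_map]
  have : ∀ s : List Char, pvHF 0 s = pvHash s := fun s => (pvHash_eq_HF s).symm
  simp only [this]
  rw [pvSuffixDict_get?]
  simp [PySem.Dict.get?_empty]

lemma pvKey_iff (t : Int) (ht0 : 0 ≤ t) (ht1 : t < 10000000) (n2 : Nat)
    (p s : List Char) (hs : ∀ c ∈ s, c ∈ pvChars)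
    (hslen : s.length = n2) :
    pvHash (p ++ s) = t ↔ pvHash s = PySem.Int.mod (t - pvHash p * pvPow64 n2) 10000000 := by
  have hsb : ∀ c ∈ s, (c.toNat : Int) < 10000000 :=
    fun c hc => (pvChars_prop c (hs c hc)).1
  have hpbd := pvHF_bounds p 0 le_rfl (by norm_num)
  have hsbd := pvHF_bounds s 0 le_rfl (by norm_num)
  have happ : pvHF 0 (p ++ s) = pvHF (pvHF 0 p) s := by
    simp [pvHF, List.foldl_append]
  rw [pvHash_eq_HF, pvHash_eq_HF, pvHash_eq_HF, happ,
    pvHF_compose s (pvHF 0 p) hpbd.1 hpbd.2 hsb, hslen,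
    PySem.Int.mod_eq_emod_of_pos (show (0:Int) < 10000000 by norm_num), pvPow64_spec]
  have e1 : t - pvHF 0 p * ((64:Int) ^ n2 % 10000000) ≡ t - pvHF 0 p * (64:Int) ^ n2 [ZMOD 10000000] :=
    (Int.ModEq.refl t).sub ((Int.ModEq.refl (pvHF 0 p)).mul (Int.emod_emod_of_dvd _ dvd_rfl))
  rw [show (t - pvHF 0 p * ((64:Int) ^ n2 % 10000000)) % 10000000
      = (t - pvHF 0 p * (64:Int) ^ n2) % 10000000 from e1]
  generalize pvHF 0 p * (64:Int) ^ n2 = X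
  generalize hY : pvHF 0 s = Y
  rw [hY] at hsbd
  obtain ⟨hY0, hY1⟩ := hsbd
  omega

lemma pvCore (t : Int) (ht0 : 0 ≤ t) (ht1 : t < 10000000) (n1 n2 : Nat) :
    (pvCombos (n1 + n2)).findSome? (fun combination =>
        if operate_upon (combination ++ ['\x00']) = t then some (String.ofList combination) else none)
      = (pvProdHLazy n1).findSome? (fun ph =>
          match (pvSuffixDict n2).get? (PySem.Int.mod (t - ph.2 * pvPow64 n2) 10000000) with
          | some s => some (String.ofList (ph.1 ++ s))
          | none => none) := by
  rw [pvProdHLazy_eq, pvProdH_eq, List.findSome?_map]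
  have hHF : ∀ s : List Char, pvHF 0 s = pvHash s := fun s => (pvHash_eq_HF s).symm
  simp only [Function.comp_def, hHF]
  rw [pvCombos_split, pvFindSome?_flatMap]
  apply pvFindSome?_congr
  intro p hpmem
  have hp : ∀ c ∈ p, c ∈ pvChars := pvCombos_chars p hpmem
  rw [List.findSome?_map]
  have step1 : ((fun combination =>
        if operate_upon (combination ++ ['\x00']) = t then some (String.ofList combination) else none)
      ∘ fun s => p ++ s)
      = fun s : List Char =>
        if operate_upon ((p ++ s) ++ ['\x00']) = t then some (String.ofList (p ++ s)) else none := rfl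
  rw [step1]
  rw [pvFindSome?_congr (pvCombos n2) _
    (fun s => if (pvHash s == PySem.Int.mod (t - pvHash p * pvPow64 n2) 10000000)
      then some (String.ofList (p ++ s)) else none) ?_]
  · rw [pvFindSome?_ite, ← pvSuffixDict_spec]
    cases h : (pvSuffixDict n2).get? (PySem.Int.mod (t - pvHash p * pvPow64 n2) 10000000) <;>
      simp
  · intro s hsmem
    have hs : ∀ c ∈ s, c ∈ pvChars := pvCombos_chars s hsmem
    have hps : ∀ c ∈ p ++ s, c ∈ pvChars := by
      intro c hc
      rcases List.mem_append.mp hc with h | h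
      · exact hp c h
      · exact hs c h
    rw [operate_upon_eq_hash (p ++ s) hps]
    simp only [pvKey_iff t ht0 ht1 n2 p s hs (pvCombos_length s hsmem), beq_iff_eq]

-- ===== VERDICT (by name: the statement is the Claim_ definition above) =====
theorem find_input_for_result_spec : Claim_equal_find_input_for_result := by
  intro t ml _hdom
  unfold Spec_find_input_for_result find_input_for_result find_input_for_result_alt
  by_cases ht : 0 ≤ t ∧ t < 10000000
  · rw [if_pos ht]
    apply pvFindSome?_congr
    intro L hL
    have hL1 : 1 ≤ L := ((PySem.List.mem_pyRange_one).mp hL).1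
    have hLn : L = (L.toNat : Int) := (Int.toNat_of_nonneg (by omega)).symm
    have hfd : (PySem.Int.floordiv L 2).toNat = L.toNat / 2 := by
      rw [PySem.Int.floordiv_eq_ediv_of_pos (by norm_num : (0:Int) < 2)]
      omega
    simp only [hfd]
    have hsplit : L.toNat = (L.toNat - L.toNat / 2) + L.toNat / 2 := by omega
    rw [show pvCombos L.toNat = pvCombos ((L.toNat - L.toNat / 2) + L.toNat / 2) by rw [← hsplit]]
    exact pvCore t ht.1 ht.2 _ _
  · rw [if_neg ht]
    rw [List.findSome?_eq_none_iff]
    intro L hL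
    rw [List.findSome?_eq_none_iff]
    intro comb hcomb
    simp only
    rw [operate_upon_eq_hash comb (pvCombos_chars comb hcomb), pvHash_eq_HF]
    have hb := pvHF_bounds comb 0 le_rfl (by norm_num)
    rw [if_neg (by omega)]
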